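-- pv_equiv track=rewrite | github.com/tensorflow/tensorflow | tensorflow/python/tpu/device_assignment.py | _open_ring_2d
-- ===== SOURCE A (Python) =====
-- from typing import List, Optional, Text, Tuple
--
-- def _open_ring_2d(x_size: int, y_size: int,
--                   z_coord: int) -> List[Tuple[int, int, int]]:
--   """Ring-order of a X by Y mesh, with a fixed Z coordinate.
--
--   For example, in a 4x4 mesh, this returns the following order.
--     0 -- 1 -- 2 -- 3
--     |    |    |    |
--     15-- 6 -- 5 -- 4
--     |    |    |    |
--     14-- 7 -- 8 -- 9
--     |    |    |    |
--     13-- 12-- 11-- 10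
--
--   Note that chip 0 is not included in the output.
--
--   Args:
--     x_size: An integer represents the mesh size in the x-dimension. Must be
--       larger than 1.
--     y_size: An integer represents the mesh size in the y-dimension. Must be
--       larger than 1.
--     z_coord: An integer represents the z-coordinate to use for the chips in the
--       ring.
--
--   Returns:
--     A list of (x,y,z) triples in ring order.
--   """
--   ret = []
--   for i in range(y_size // 2):
--     for j in range(1, x_size):
--       ret.append((j, 2 * i, z_coord))
--     for j in range(x_size - 1, 0, -1):
--       ret.append((j, 2 * i + 1, z_coord))
--   for i in range(y_size - 1, 0, -1):
--     ret.append((0, i, z_coord))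
--   return ret
-- ===== SOURCE B (Python) =====
-- from typing import List, Tuple
--
-- def _open_ring_2d(x_size: int, y_size: int,
--                   z_coord: int) -> List[Tuple[int, int, int]]:
--     # Closed-form indexing: the k-th chip of the ring is computed directly
--     # from k by arithmetic, instead of traversing the mesh.
--     w = max(x_size - 1, 0)              # x-extent of the snake rows
--     rows = max(2 * (y_size // 2), 0)    # number of snake rows
--     snake = rows * w                    # chips in the boustrophedon part
--     tail = max(y_size - 1, 0)           # chips in the closing x=0 column
--
--     def pos(k):
--         if k < snake:
--             r, off = divmod(k, w)
--             if r % 2 == 0: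
--                 return (off + 1, r, z_coord)
--             return (w - off, r, z_coord)
--         return (0, y_size - 1 - (k - snake), z_coord)
--
--     return [pos(k) for k in range(snake + tail)]
-- ===== Notes on version B (the rewrite author's own statement) =====
-- stated objective: alternative
-- what changed: Replaces A's traversal (nested row loops plus a closing-column loop appending to a list) with closed-form random-access indexing: the total length is computed arithmetically and the k-th triple is produced directly from k via divmod, with no traversal state.
import Mathlib
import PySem

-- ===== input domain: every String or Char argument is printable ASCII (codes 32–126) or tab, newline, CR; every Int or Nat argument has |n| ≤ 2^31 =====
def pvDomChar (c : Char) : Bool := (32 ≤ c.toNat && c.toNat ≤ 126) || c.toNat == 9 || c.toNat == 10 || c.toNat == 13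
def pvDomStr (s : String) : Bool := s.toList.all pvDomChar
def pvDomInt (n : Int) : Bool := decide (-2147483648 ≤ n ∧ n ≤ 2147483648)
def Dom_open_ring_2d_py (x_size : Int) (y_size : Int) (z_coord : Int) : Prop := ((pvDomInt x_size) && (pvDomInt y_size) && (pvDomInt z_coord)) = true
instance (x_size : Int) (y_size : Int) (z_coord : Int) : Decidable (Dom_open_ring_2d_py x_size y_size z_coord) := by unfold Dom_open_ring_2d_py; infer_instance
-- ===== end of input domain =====

-- B replaces A's mesh traversal by closed-form indexing: the k-th triple is computed directly from k by divmod; objective: alternative.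

-- ===== PORT A =====
def open_ring_2d_py (x_size : Int) (y_size : Int) (z_coord : Int) : List (Int × Int × Int) :=
  let ret : List (Int × Int × Int) := []
  let ret := (PySem.List.pyRange 0 (PySem.Int.floordiv y_size 2) 1).foldl (fun ret i =>
    let ret := (PySem.List.pyRange 1 x_size 1).foldl (fun ret j => ret ++ [(j, 2 * i, z_coord)]) ret
    (PySem.List.pyRange (x_size - 1) 0 (-1)).foldl (fun ret j => ret ++ [(j, 2 * i + 1, z_coord)]) ret) ret
  (PySem.List.pyRange (y_size - 1) 0 (-1)).foldl (fun ret i => ret ++ [(0, i, z_coord)]) ret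

-- ===== PORT B =====
def open_ring_2d_py_alt (x_size : Int) (y_size : Int) (z_coord : Int) : List (Int × Int × Int) :=
  let w := max (x_size - 1) 0
  let rows := max (2 * PySem.Int.floordiv y_size 2) 0
  let snake := rows * w
  let tail := max (y_size - 1) 0
  (PySem.List.pyRange 0 (snake + tail) 1).map (fun k =>
    if k < snake then
      let r := PySem.Int.floordiv k w
      let off := PySem.Int.mod k w
      if PySem.Int.mod r 2 = 0 then (off + 1, r, z_coord)
      else (w - off, r, z_coord)
    else (0, y_size - 1 - (k - snake), z_coord))

-- ===== PRECONDITION & SPEC =====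
def Spec_open_ring_2d_py (x_size : Int) (y_size : Int) (z_coord : Int) (out : List (Int × Int × Int)) : Prop := out = open_ring_2d_py_alt x_size y_size z_coord
instance (x_size : Int) (y_size : Int) (z_coord : Int) (out : List (Int × Int × Int)) : Decidable (Spec_open_ring_2d_py x_size y_size z_coord out) := by unfold Spec_open_ring_2d_py; infer_instance

-- ===== CLAIM (what is proved, stated in full; the proofs are below) =====
def Claim_equal_open_ring_2d_py : Prop := ∀ (x_size : Int) (y_size : Int) (z_coord : Int), Dom_open_ring_2d_py x_size y_size z_coord → Spec_open_ring_2d_py x_size y_size z_coord (open_ring_2d_py x_size y_size z_coord)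

-- ===== LEMMAS AND PROOFS =====

/-- An append-one-element fold is the accumulator followed by a map. -/
theorem foldl_append_map {α β : Type} (f : α → β) :
    ∀ (l : List α) (acc : List β),
      l.foldl (fun r j => r ++ [f j]) acc = acc ++ l.map f := by
  intro l
  induction l with
  | nil => simp
  | cons a t ih => intro acc; simp [List.foldl, ih]

/-- A fold that appends a block per element is the accumulator followed by a flatMap. -/
theorem foldl_append_block {α β : Type} (g : α → List β) :
    ∀ (l : List α) (acc : List β),
      l.foldl (fun r i => r ++ g i) acc = acc ++ l.flatMap g := by
  intro l
  induction l with
  | nil => simp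
  | cons a t ih => intro acc; simp [List.foldl, ih]

/-- The body of B's comprehension, named for the proofs. -/
def pvPos (x_size y_size z_coord snake : Int) (k : Int) : Int × Int × Int :=
  if k < snake then
    if PySem.Int.mod (PySem.Int.floordiv k (max (x_size - 1) 0)) 2 = 0 then
      (PySem.Int.mod k (max (x_size - 1) 0) + 1, PySem.Int.floordiv k (max (x_size - 1) 0), z_coord)
    else (max (x_size - 1) 0 - PySem.Int.mod k (max (x_size - 1) 0), PySem.Int.floordiv k (max (x_size - 1) 0), z_coord)
  else (0, y_size - 1 - (k - snake), z_coord)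

/-- B is the map of `pvPos` over one index range. -/
theorem alt_eq_pos (x_size y_size z_coord : Int) :
    open_ring_2d_py_alt x_size y_size z_coord
      = (PySem.List.pyRange 0
          ((max (2 * PySem.Int.floordiv y_size 2) 0) * max (x_size - 1) 0 + max (y_size - 1) 0) 1).map
          (pvPos x_size y_size z_coord ((max (2 * PySem.Int.floordiv y_size 2) 0) * max (x_size - 1) 0)) := by
  unfold open_ring_2d_py_alt pvPos
  rfl

/-- A's row block for row pair index `i`. -/
def pvBlock (x_size z_coord : Int) (i : Int) : List (Int × Int × Int) :=
  (PySem.List.pyRange 1 x_size 1).map (fun j => (j, 2 * i, z_coord))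
  ++ (PySem.List.pyRange (x_size - 1) 0 (-1)).map (fun j => (j, 2 * i + 1, z_coord))

/-- A is the flatMap of its row blocks followed by the closing column. -/
theorem a_eq_blocks (x_size y_size z_coord : Int) :
    open_ring_2d_py x_size y_size z_coord
      = (PySem.List.pyRange 0 (PySem.Int.floordiv y_size 2) 1).flatMap (pvBlock x_size z_coord)
        ++ (PySem.List.pyRange (y_size - 1) 0 (-1)).map (fun i => (0, i, z_coord)) := by
  unfold open_ring_2d_py
  simp only
  rw [foldl_append_map (fun i => ((0 : Int), i, z_coord))]
  congr 1
  have hfun : (fun (ret : List (Int × Int × Int)) i =>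
      (PySem.List.pyRange (x_size - 1) 0 (-1)).foldl (fun ret j => ret ++ [(j, 2 * i + 1, z_coord)])
        ((PySem.List.pyRange 1 x_size 1).foldl (fun ret j => ret ++ [(j, 2 * i, z_coord)]) ret))
      = fun ret i => ret ++ pvBlock x_size z_coord i := by
    funext ret i
    rw [foldl_append_map, foldl_append_map]
    simp [pvBlock, List.append_assoc]
  rw [hfun, foldl_append_block]
  simp

/-- Evaluation of `pvPos` inside row `r` of the snake, even `r`. -/
theorem pvPos_even (x_size y_size z_coord snake : Int) (r t : Int)
    (hw : 0 < x_size - 1) (_hr : 0 ≤ r) (hrer : PySem.Int.mod r 2 = 0)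
    (ht : 0 ≤ t) (ht2 : t < x_size - 1)
    (hlt : r * (x_size - 1) + t < snake) :
    pvPos x_size y_size z_coord snake (r * (x_size - 1) + t) = (t + 1, r, z_coord) := by
  have hwmax : max (x_size - 1) 0 = x_size - 1 := by omega
  have hfd : PySem.Int.floordiv (r * (x_size - 1) + t) (x_size - 1) = r := by
    rw [PySem.Int.floordiv_eq_iff_of_pos hw]
    constructor <;> nlinarith
  have hmod : PySem.Int.mod (r * (x_size - 1) + t) (x_size - 1) = t := by
    have := PySem.Int.floordiv_mul_add_mod (r * (x_size - 1) + t) (x_size - 1)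
    rw [hfd] at this; omega
  unfold pvPos
  simp only [hwmax]
  rw [if_pos hlt, hfd, hmod, if_pos hrer]

/-- Evaluation of `pvPos` inside row `r` of the snake, odd `r`. -/
theorem pvPos_odd (x_size y_size z_coord snake : Int) (r t : Int)
    (hw : 0 < x_size - 1) (_hr : 0 ≤ r) (hrer : PySem.Int.mod r 2 ≠ 0)
    (ht : 0 ≤ t) (ht2 : t < x_size - 1)
    (hlt : r * (x_size - 1) + t < snake) :
    pvPos x_size y_size z_coord snake (r * (x_size - 1) + t) = (x_size - 1 - t, r, z_coord) := by
  have hwmax : max (x_size - 1) 0 = x_size - 1 := by omega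
  have hfd : PySem.Int.floordiv (r * (x_size - 1) + t) (x_size - 1) = r := by
    rw [PySem.Int.floordiv_eq_iff_of_pos hw]
    constructor <;> nlinarith
  have hmod : PySem.Int.mod (r * (x_size - 1) + t) (x_size - 1) = t := by
    have := PySem.Int.floordiv_mul_add_mod (r * (x_size - 1) + t) (x_size - 1)
    rw [hfd] at this; omega
  unfold pvPos
  simp only [hwmax]
  rw [if_pos hlt, hfd, hmod, if_neg hrer]

/-- B's map over one even snake row equals A's forward row. -/
theorem row_even (x_size y_size z_coord snake : Int) (i : Int)
    (hw : 0 < x_size - 1) (hi : 0 ≤ i)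
    (hlt : (2 * i + 1) * (x_size - 1) ≤ snake) :
    (PySem.List.pyRange (2 * i * (x_size - 1)) (2 * i * (x_size - 1) + (x_size - 1)) 1).map
      (pvPos x_size y_size z_coord snake)
      = (PySem.List.pyRange 1 x_size 1).map (fun j => (j, 2 * i, z_coord)) := by
  rw [PySem.List.pyRange_one (2 * i * (x_size - 1)), PySem.List.pyRange_one 1 x_size]
  have h1 : (2 * i * (x_size - 1) + (x_size - 1) - 2 * i * (x_size - 1)).toNat = (x_size - 1).toNat := by omega
  have h2 : (x_size - 1).toNat = (x_size - 1).toNat := rfl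
  rw [h1, show (x_size - 1).toNat = (x_size - 1).toNat from rfl, List.map_map, List.map_map]
  apply List.map_congr_left
  intro t ht
  have htlt : (t : Int) < x_size - 1 := by
    have := List.mem_range.mp ht
    omega
  have heven : PySem.Int.mod (2 * i) 2 = 0 := by
    rw [PySem.Int.mod_eq_emod_of_pos (by norm_num : (0:Int) < 2)]
    omega
  have hpe := pvPos_even x_size y_size z_coord snake (2 * i) (t : Int) hw (by omega) heven
    (by positivity) htlt (by nlinarith)
  simp only [Function.comp_apply]
  rw [hpe]
  simp [add_comm]

/-- B's map over one odd snake row equals A's backward row. -/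
theorem row_odd (x_size y_size z_coord snake : Int) (i : Int)
    (hw : 0 < x_size - 1) (hi : 0 ≤ i)
    (hlt : (2 * i + 2) * (x_size - 1) ≤ snake) :
    (PySem.List.pyRange ((2 * i + 1) * (x_size - 1)) ((2 * i + 1) * (x_size - 1) + (x_size - 1)) 1).map
      (pvPos x_size y_size z_coord snake)
      = (PySem.List.pyRange (x_size - 1) 0 (-1)).map (fun j => (j, 2 * i + 1, z_coord)) := by
  rw [PySem.List.pyRange_one ((2 * i + 1) * (x_size - 1)), PySem.List.pyRange_neg_one (x_size - 1) 0]
  have h1 : ((2 * i + 1) * (x_size - 1) + (x_size - 1) - (2 * i + 1) * (x_size - 1)).toNat = (x_size - 1).toNat := by omega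
  have h2 : (x_size - 1 - 0).toNat = (x_size - 1).toNat := by omega
  rw [h1, h2, List.map_map, List.map_map]
  apply List.map_congr_left
  intro t ht
  have htlt : (t : Int) < x_size - 1 := by
    have := List.mem_range.mp ht
    omega
  have hodd : PySem.Int.mod (2 * i + 1) 2 ≠ 0 := by
    rw [PySem.Int.mod_eq_emod_of_pos (by norm_num : (0:Int) < 2)]
    omega
  have hpo := pvPos_odd x_size y_size z_coord snake (2 * i + 1) (t : Int) hw (by omega) hodd
    (by positivity) htlt (by nlinarith)
  simp only [Function.comp_apply]
  rw [hpo]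

/-- B's snake prefix equals the flatMap of A's row blocks (positive-width case). -/
theorem snake_eq (x_size y_size z_coord snake : Int) (hw : 0 < x_size - 1) :
    ∀ (M : Nat), 2 * (M : Int) * (x_size - 1) ≤ snake →
      (PySem.List.pyRange 0 (2 * (M : Int) * (x_size - 1)) 1).map (pvPos x_size y_size z_coord snake)
        = (PySem.List.pyRange 0 (M : Int) 1).flatMap (pvBlock x_size z_coord) := by
  intro M
  induction M with
  | zero =>
    intro _
    simp [PySem.List.pyRange_one_eq_nil (le_refl (0 : Int))]
  | succ M ih =>
    intro hM
    have hcast : ((M + 1 : Nat) : Int) = (M : Int) + 1 := by push_cast; ring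
    rw [hcast] at hM ⊢
    have hM' : 2 * (M : Int) * (x_size - 1) ≤ snake := by nlinarith
    have e0 : (0:Int) ≤ 2 * (M : Int) * (x_size - 1) := by positivity
    have key : 2 * ((M : Int) + 1) * (x_size - 1)
        = 2 * (M : Int) * (x_size - 1) + (x_size - 1) + (x_size - 1) := by ring
    rw [key]
    rw [PySem.List.pyRange_one_append 0 (2 * (M : Int) * (x_size - 1) + (x_size - 1))
        (2 * (M : Int) * (x_size - 1) + (x_size - 1) + (x_size - 1)) (by omega) (by omega)]
    rw [PySem.List.pyRange_one_append 0 (2 * (M : Int) * (x_size - 1))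
        (2 * (M : Int) * (x_size - 1) + (x_size - 1)) e0 (by omega)]
    rw [List.map_append, List.map_append, ih hM']
    rw [PySem.List.pyRange_one_succ_right (by positivity : (0:Int) ≤ (M : Int)),
        List.flatMap_append]
    have he := row_even x_size y_size z_coord snake (M : Int) hw (by positivity)
      (by nlinarith)
    have ho := row_odd x_size y_size z_coord snake (M : Int) hw (by positivity)
      (by nlinarith)
    rw [he]
    rw [show 2 * (M : Int) * (x_size - 1) + (x_size - 1) = (2 * (M : Int) + 1) * (x_size - 1) by ring]
    rw [ho]
    simp [pvBlock, List.append_assoc]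

/-- B's tail suffix equals A's closing-column loop. -/
theorem tail_eq (x_size y_size z_coord snake : Int) (_hs : 0 ≤ snake) :
    (PySem.List.pyRange snake (snake + max (y_size - 1) 0) 1).map (pvPos x_size y_size z_coord snake)
      = (PySem.List.pyRange (y_size - 1) 0 (-1)).map (fun i => ((0 : Int), i, z_coord)) := by
  rw [PySem.List.pyRange_one snake, PySem.List.pyRange_neg_one (y_size - 1) 0]
  have h1 : (snake + max (y_size - 1) 0 - snake).toNat = (y_size - 1 - 0).toNat := by omega
  rw [h1, List.map_map, List.map_map]
  apply List.map_congr_left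
  intro t _
  simp only [Function.comp_apply]
  unfold pvPos
  rw [if_neg (by omega)]
  simp only [Prod.mk.injEq]
  exact ⟨trivial, by omega, trivial⟩

/-- The full snake prefix, all cases of the sizes. -/
theorem snake_all (x_size y_size z_coord : Int) :
    (PySem.List.pyRange 0 ((max (2 * PySem.Int.floordiv y_size 2) 0) * max (x_size - 1) 0) 1).map
        (pvPos x_size y_size z_coord ((max (2 * PySem.Int.floordiv y_size 2) 0) * max (x_size - 1) 0))
      = (PySem.List.pyRange 0 (PySem.Int.floordiv y_size 2) 1).flatMap (pvBlock x_size z_coord) := by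
  by_cases hm : PySem.Int.floordiv y_size 2 ≤ 0
  · have h1 : max (2 * PySem.Int.floordiv y_size 2) 0 = 0 := by omega
    rw [h1, zero_mul,
        PySem.List.pyRange_one_eq_nil (le_refl (0 : Int)),
        PySem.List.pyRange_one_eq_nil hm]
    simp
  · push_neg at hm
    by_cases hw : x_size - 1 ≤ 0
    · have h1 : max (x_size - 1) 0 = 0 := by omega
      rw [h1, mul_zero, PySem.List.pyRange_one_eq_nil (le_refl (0 : Int))]
      have hblock : ∀ i, pvBlock x_size z_coord i = [] := by
        intro i
        unfold pvBlock
        rw [PySem.List.pyRange_one_eq_nil (by omega), PySem.List.pyRange_neg_one_eq_nil (by omega)]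
        simp
      exact (List.flatMap_eq_nil_iff.mpr (fun i _ => hblock i)).symm
    · push_neg at hw
      set m := PySem.Int.floordiv y_size 2 with hmdef
      have hrows : max (2 * m) 0 = 2 * m := by omega
      have hwmax : max (x_size - 1) 0 = x_size - 1 := by omega
      obtain ⟨M, hMn⟩ : ∃ M : Nat, m = (M : Int) := ⟨m.toNat, by omega⟩
      rw [hrows, hwmax, hMn]
      exact snake_eq x_size y_size z_coord (2 * (M : Int) * (x_size - 1)) hw M (le_refl _)

-- ===== VERDICT (by name: the statement is the Claim_ definition above) =====
theorem open_ring_2d_py_spec : Claim_equal_open_ring_2d_py := by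
  intro x_size y_size z_coord _hdom
  show open_ring_2d_py x_size y_size z_coord = open_ring_2d_py_alt x_size y_size z_coord
  rw [alt_eq_pos, a_eq_blocks]
  have hs0 : (0:Int) ≤ (max (2 * PySem.Int.floordiv y_size 2) 0) * max (x_size - 1) 0 :=
    mul_nonneg (by omega) (by omega)
  rw [PySem.List.pyRange_one_append 0
        ((max (2 * PySem.Int.floordiv y_size 2) 0) * max (x_size - 1) 0)
        ((max (2 * PySem.Int.floordiv y_size 2) 0) * max (x_size - 1) 0 + max (y_size - 1) 0)
        hs0 (by omega)]
  rw [List.map_append, snake_all, tail_eq _ _ _ _ hs0]
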